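-- pv_equiv track=rewrite | github.com/Howuhh/cs_algorithms | cses_problem_set/sorting_and_searching/towers.py | min_towers
-- ===== SOURCE A (Python) =====
-- from bisect import bisect_right
--
-- def min_towers(cubes):  # nlogn
--     towers = []
--
--     for cube in cubes: # n
--         idx = bisect_right(towers, cube) # logn
--
--         if idx >= len(towers):
--             towers.append(cube)
--         else:
--             towers[idx] = cube
--
--     return len(towers)
-- ===== SOURCE B (Python) =====
-- def min_towers(cubes):  # O(n^2) DP: answer = length of longest non-decreasing subsequence
--     dp = []
--     best = 0
--     for i, c in enumerate(cubes):
--         m = 0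
--         for j in range(i):
--             if cubes[j] <= c and dp[j] > m:
--                 m = dp[j]
--         dp.append(m + 1)
--         if m + 1 > best:
--             best = m + 1
--     return best
-- ===== Notes on version B (the rewrite author's own statement) =====
-- stated objective: alternative
-- what changed: Replaces the patience-sorting tower list maintained via bisect_right with an O(n^2) dynamic program computing the length of the longest non-decreasing subsequence (dp[i] = 1 + max dp[j] over j<i with cubes[j] <= cubes[i]).
import Mathlib
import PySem

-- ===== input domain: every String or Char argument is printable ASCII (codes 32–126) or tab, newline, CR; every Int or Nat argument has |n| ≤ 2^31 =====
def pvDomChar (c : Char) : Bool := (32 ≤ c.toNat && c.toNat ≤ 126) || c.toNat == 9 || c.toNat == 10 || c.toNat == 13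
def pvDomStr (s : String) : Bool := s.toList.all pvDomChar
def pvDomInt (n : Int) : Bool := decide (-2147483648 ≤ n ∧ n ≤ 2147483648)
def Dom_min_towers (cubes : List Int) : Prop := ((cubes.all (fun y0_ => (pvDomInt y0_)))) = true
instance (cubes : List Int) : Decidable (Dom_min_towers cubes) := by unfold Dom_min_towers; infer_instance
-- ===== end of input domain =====

-- B replaces A's bisect-based patience towers with an O(n^2) longest-non-decreasing-subsequence DP; objective: alternative algorithm.

-- ===== PORT A =====
-- bisect_right(towers, x): towers is kept sorted by the loop, and on a sorted list
-- Python's bisect_right returns exactly the number of elements ≤ x; ported as that count (exact there).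
def pyBisectRight (l : List Int) (x : Int) : Nat :=
  l.countP (fun t => decide (t ≤ x))

def minTowersStep (towers : List Int) (cube : Int) : List Int :=
  let idx := pyBisectRight towers cube
  if idx ≥ towers.length then towers ++ [cube] else towers.set idx cube

def min_towers (cubes : List Int) : Int :=
  ((cubes.foldl minTowersStep []).length : Int)

-- ===== PORT B =====
-- state: list of (cube, dp) pairs for the processed prefix, together with the running best.
def innerMax (prev : List (Int × Int)) (c : Int) : Int :=
  prev.foldl (fun m p => if p.1 ≤ c ∧ p.2 > m then p.2 else m) 0

def altStep (st : List (Int × Int) × Int) (c : Int) : List (Int × Int) × Int :=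
  let m := innerMax st.1 c
  (st.1 ++ [(c, m + 1)], if m + 1 > st.2 then m + 1 else st.2)

def min_towers_alt (cubes : List Int) : Int :=
  (cubes.foldl altStep ([], 0)).2

-- ===== PRECONDITION & SPEC =====
def Spec_min_towers (cubes : List Int) (out : Int) : Prop := out = min_towers_alt cubes
instance (cubes : List Int) (out : Int) : Decidable (Spec_min_towers cubes out) := by unfold Spec_min_towers; infer_instance

-- ===== CLAIM (what is proved, stated in full; the proofs are below) =====
def Claim_equal_min_towers : Prop := ∀ (cubes : List Int), Dom_min_towers cubes → Spec_min_towers cubes (min_towers cubes)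

-- ===== LEMMAS AND PROOFS =====

-- head of dropWhile fails the predicate
theorem dropWhile_head_false (p : Int → Bool) :
    ∀ (l : List Int) (hd : Int) (tl : List Int), l.dropWhile p = hd :: tl → p hd = false := by
  intro l
  induction l with
  | nil => intro hd tl h; simp at h
  | cons a l ih =>
      intro hd tl h
      by_cases hpa : p a
      · rw [List.dropWhile_cons_of_pos hpa] at h
        exact ih _ _ h
      · rw [List.dropWhile_cons_of_neg hpa] at h
        cases h
        simpa using hpa

-- Invariant tying A's tower list to B's dp pairs and running best:
-- towers is sorted, for every x the number of towers ≤ x equals B's inner max over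
-- pairs with value ≤ x, and best equals the number of towers.
def TowersInv (towers : List Int) (pairs : List (Int × Int)) (best : Int) : Prop :=
  towers.Pairwise (· ≤ ·) ∧
  (∀ x : Int, (towers.countP (fun t => decide (t ≤ x)) : Int) = innerMax pairs x) ∧
  best = (towers.length : Int)

theorem innerMax_append (p : List (Int × Int)) (c d x : Int) :
    innerMax (p ++ [(c, d)]) x =
      if c ≤ x ∧ d > innerMax p x then d else innerMax p x := by
  simp [innerMax, List.foldl_append]

theorem towersInv_init : TowersInv [] [] 0 := by
  refine ⟨List.Pairwise.nil, fun x => ?_, rfl⟩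
  simp [innerMax]

theorem towersInv_step (towers : List Int) (pairs : List (Int × Int)) (best : Int)
    (c : Int) (h : TowersInv towers pairs best) :
    TowersInv (minTowersStep towers c) (altStep (pairs, best) c).1 (altStep (pairs, best) c).2 := by
  obtain ⟨hsort, hcnt, hbest⟩ := h
  have hm : (towers.countP (fun t => decide (t ≤ c)) : Int) = innerMax pairs c := hcnt c
  simp only [minTowersStep, pyBisectRight, altStep]
  by_cases hge : towers.countP (fun t => decide (t ≤ c)) ≥ towers.length
  · -- append branch of A
    rw [if_pos hge]
    have hfull : towers.countP (fun t => decide (t ≤ c)) = towers.length :=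
      le_antisymm List.countP_le_length hge
    have hall : ∀ a ∈ towers, a ≤ c := by
      have := List.countP_eq_length.mp hfull
      intro a ha; simpa using this a ha
    have hmlen : innerMax pairs c = (towers.length : Int) := by
      rw [← hm, hfull]
    have hbig : innerMax pairs c + 1 > best := by rw [hmlen, hbest]; omega
    refine ⟨?_, ?_, ?_⟩
    · refine List.pairwise_append.mpr ⟨hsort, by simp, ?_⟩
      intro a ha b hb
      simp only [List.mem_singleton] at hb
      subst hb; exact hall a ha
    · intro x
      rw [innerMax_append]
      by_cases hcx : c ≤ x
      · have hallx : ∀ a ∈ towers, decide (a ≤ x) = true := by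
          intro a ha; simpa using le_trans (hall a ha) hcx
        have h1 : towers.countP (fun t => decide (t ≤ x)) = towers.length :=
          List.countP_eq_length.mpr hallx
        have h2 : innerMax pairs x = (towers.length : Int) := by rw [← hcnt x, h1]
        rw [if_pos ⟨hcx, by rw [h2, hmlen]; omega⟩]
        simp [List.countP_append, hcx, h1, hmlen]
      · rw [if_neg (by intro hc; exact hcx hc.1)]
        rw [← hcnt x]
        simp [List.countP_append, hcx]
    · rw [if_pos hbig]
      simp [hmlen]
  · -- replace branch of A
    rw [if_neg hge]
    replace hge := Nat.lt_of_not_le hge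
    have heq : towers.takeWhile (fun t => decide (t ≤ c)) ++
        towers.dropWhile (fun t => decide (t ≤ c)) = towers := List.takeWhile_append_dropWhile
    have hall1 : ∀ a ∈ towers.takeWhile (fun t => decide (t ≤ c)), a ≤ c := by
      intro a ha; simpa using List.mem_takeWhile_imp ha
    cases ht2 : towers.dropWhile (fun t => decide (t ≤ c)) with
    | nil =>
        exfalso
        rw [ht2, List.append_nil] at heq
        have : towers.countP (fun t => decide (t ≤ c)) = towers.length := by
          refine List.countP_eq_length.mpr ?_
          intro a ha
          have : a ≤ c := hall1 a (by rw [heq]; exact ha)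
          simpa using this
        omega
    | cons hd tl =>
        have hhd : ¬ hd ≤ c := by
          have := dropWhile_head_false (fun t => decide (t ≤ c)) towers hd tl ht2
          simpa using this
        -- towers = t1 ++ hd :: tl, with t1 all ≤ c and hd (hence all of hd :: tl) > c
        set t1 := towers.takeWhile (fun t => decide (t ≤ c)) with ht1
        have htow : towers = t1 ++ hd :: tl := by rw [← heq, ht2]
        rw [htow] at hge hm hcnt hbest hsort ⊢
        obtain ⟨hs1, hs2, hcross⟩ := List.pairwise_append.mp hsort
        have htl : ∀ b ∈ tl, hd ≤ b := (List.pairwise_cons.mp hs2).1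
        have hc1 : t1.countP (fun t => decide (t ≤ c)) = t1.length :=
          List.countP_eq_length.mpr (fun a ha => by simpa using hall1 a ha)
        have hc2 : (hd :: tl).countP (fun t => decide (t ≤ c)) = 0 := by
          refine List.countP_eq_zero.mpr ?_
          intro a ha
          rcases List.mem_cons.mp ha with h | h
          · subst h; simpa using hhd
          · have : hd ≤ a := htl a h
            simp only [decide_eq_true_eq]
            omega
        have hidx : (t1 ++ hd :: tl).countP (fun t => decide (t ≤ c)) = t1.length := by
          rw [List.countP_append, hc1, hc2]
          omega
        have hset : (t1 ++ hd :: tl).set ((t1 ++ hd :: tl).countP (fun t => decide (t ≤ c))) c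
            = t1 ++ c :: tl := by
          rw [hidx, List.set_append, if_neg (by omega), Nat.sub_self, List.set_cons_zero]
        have hmv : innerMax pairs c = (t1.length : Int) := by rw [← hm, hidx]
        rw [hset]
        refine ⟨?_, ?_, ?_⟩
        · refine List.pairwise_append.mpr ⟨hs1, ?_, ?_⟩
          · refine List.pairwise_cons.mpr ⟨?_, (List.pairwise_cons.mp hs2).2⟩
            intro b hb
            have := htl b hb
            omega
          · intro a ha b hb
            have hac : a ≤ c := hall1 a ha
            rcases List.mem_cons.mp hb with h | h
            · omega
            · have : hd ≤ b := htl b h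
              omega
        · intro x
          rw [innerMax_append]
          have hx := hcnt x
          rw [List.countP_append, List.countP_cons] at hx
          rw [List.countP_append, List.countP_cons]
          by_cases hcx : c ≤ x
          · have h1 : t1.countP (fun t => decide (t ≤ x)) = t1.length :=
              List.countP_eq_length.mpr (fun a ha => by simpa using le_trans (hall1 a ha) hcx)
            by_cases hhx : hd ≤ x
            · -- old towers[idx] still counts: count unchanged, B's candidate not better
              have hxx : innerMax pairs x = (t1.length : Int) + tl.countP (fun t => decide (t ≤ x)) + 1 := by
                rw [← hx, h1]
                simp [hhx]
                ring
              have hcond : ¬ (c ≤ x ∧ innerMax pairs c + 1 > innerMax pairs x) := by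
                rintro ⟨-, hgt⟩
                rw [hmv, hxx] at hgt
                omega
              rw [if_neg hcond, hxx, h1]
              simp [hcx]
              ring
            · -- old towers[idx] > x ≥ c: count grows by one, B's candidate wins
              have htl0 : tl.countP (fun t => decide (t ≤ x)) = 0 := by
                refine List.countP_eq_zero.mpr ?_
                intro a ha
                have := htl a ha
                simp only [decide_eq_true_eq]
                omega
              have hxx : innerMax pairs x = (t1.length : Int) := by
                rw [← hx, h1, htl0]
                simp [hhx]
              have hcond : c ≤ x ∧ innerMax pairs c + 1 > innerMax pairs x :=
                ⟨hcx, by rw [hmv, hxx]; omega⟩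
              rw [if_pos hcond, hmv, h1, htl0]
              simp [hcx]
          · -- x < c: neither the removed nor the inserted element counts
            have hhx : ¬ hd ≤ x := by omega
            have hcond : ¬ (c ≤ x ∧ innerMax pairs c + 1 > innerMax pairs x) := fun hc => hcx hc.1
            rw [if_neg hcond, ← hx]
            simp [hcx, hhx]
        · have hnb : ¬ innerMax pairs c + 1 > best := by
            rw [hmv, hbest]
            simp only [List.length_append, List.length_cons]
            push_cast
            omega
          rw [if_neg hnb, hbest]
          simp

theorem fold_inv (cs : List Int) (towers : List Int) (pairs : List (Int × Int)) (best : Int)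
    (h : TowersInv towers pairs best) :
    ((cs.foldl minTowersStep towers).length : Int) = (cs.foldl altStep (pairs, best)).2 := by
  induction cs generalizing towers pairs best with
  | nil => exact h.2.2.symm
  | cons c cs ih =>
      have h' := towersInv_step towers pairs best c h
      simpa using ih _ _ _ h'

-- ===== VERDICT (by name: the statement is the Claim_ definition above) =====
theorem min_towers_spec : Claim_equal_min_towers := by
  intro cubes _
  unfold Spec_min_towers min_towers min_towers_alt
  exact fold_inv cubes [] [] 0 towersInv_init
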